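-- pv_equiv track=rewrite | github.com/nikhilpandasgit/news-aggregator | filter.py | _cap_by_topic
-- ===== SOURCE A (Python) =====
-- from collections import Counter, defaultdict
--
-- def _cap_by_topic(articles: list[dict], max_per_topic: int) -> list[dict]:
--     counts: dict[str, int] = defaultdict(int)
--     result: list[dict] = []
--     for a in articles:
--         topic = a.get("_topic", "General")
--         if counts[topic] < max_per_topic:
--             counts[topic] += 1
--             result.append(a)
--     return result
-- ===== SOURCE B (Python) =====
-- def _cap_by_topic(articles: list, max_per_topic: int) -> list:
--     # Stateless rank test: keep an article iff fewer than max_per_topic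
--     # articles of the same topic precede it.
--     def topic(a):
--         return a.get("_topic", "General")
--     return [a for i, a in enumerate(articles)
--             if sum(1 for b in articles[:i] if topic(b) == topic(a)) < max_per_topic]
-- ===== Notes on version B (the rewrite author's own statement) =====
-- stated objective: alternative
-- what changed: Replaces A's stateful single pass with a mutable per-topic counter dict by a stateless filter: an article is kept iff its rank among same-topic predecessors (counted from the prefix articles[:i]) is below the cap; no counter state is carried.
import Mathlib
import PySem

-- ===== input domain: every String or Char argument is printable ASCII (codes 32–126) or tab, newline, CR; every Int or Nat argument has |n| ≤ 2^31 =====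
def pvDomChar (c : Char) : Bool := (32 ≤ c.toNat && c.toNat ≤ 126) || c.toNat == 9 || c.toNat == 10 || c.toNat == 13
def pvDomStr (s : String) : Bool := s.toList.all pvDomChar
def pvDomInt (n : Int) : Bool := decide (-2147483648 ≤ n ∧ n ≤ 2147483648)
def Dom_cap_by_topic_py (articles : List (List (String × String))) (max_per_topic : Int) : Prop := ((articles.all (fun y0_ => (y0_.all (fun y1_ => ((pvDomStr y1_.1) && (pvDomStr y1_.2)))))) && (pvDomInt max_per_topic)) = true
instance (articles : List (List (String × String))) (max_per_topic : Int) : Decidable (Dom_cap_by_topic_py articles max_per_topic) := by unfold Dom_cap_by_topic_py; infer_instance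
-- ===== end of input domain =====

-- B replaces A's stateful pass (mutable per-topic counter) by a stateless rank filter
-- (keep an article iff fewer than max_per_topic same-topic articles precede it); alternative decomposition, same results.


-- a.get("_topic", "General") — shared, used by both ports
def getTopic (a : List (String × String)) : String :=
  (PySem.Dict.ofList a).getD "_topic" "General"

-- ===== PORT A =====
-- defaultdict read counts[topic] is ported as getD … 0 (the implicit 0-insertion is
-- unobservable: counts is local and only read through this default).
def cap_by_topic_py (articles : List (List (String × String))) (max_per_topic : Int) : List (List (String × String)) :=
  (articles.foldl
    (fun (st : PySem.Dict String Int × List (List (String × String))) a =>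
      let topic := getTopic a
      if st.1.getD topic 0 < max_per_topic then
        (st.1.insert topic (st.1.getD topic 0 + 1), st.2 ++ [a])
      else st)
    (PySem.Dict.empty, [])).2

-- ===== PORT B =====
-- articles[:i] with i ≥ 0 (an enumerate index) → PySem.List.slice; sum of 1s → countP.
def cap_by_topic_py_alt (articles : List (List (String × String))) (max_per_topic : Int) : List (List (String × String)) :=
  ((PySem.List.enumerate articles).filter
    (fun ia =>
      ((PySem.List.slice articles none (some ia.1)).countP
        (fun b => getTopic b == getTopic ia.2) : Int) < max_per_topic)).map (·.2)

-- ===== PRECONDITION & SPEC =====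
def Spec_cap_by_topic_py (articles : List (List (String × String))) (max_per_topic : Int) (out : List (List (String × String))) : Prop := out = cap_by_topic_py_alt articles max_per_topic
instance (articles : List (List (String × String))) (max_per_topic : Int) (out : List (List (String × String))) : Decidable (Spec_cap_by_topic_py articles max_per_topic out) := by unfold Spec_cap_by_topic_py; infer_instance

-- ===== CLAIM (what is proved, stated in full; the proofs are below) =====
def Claim_equal_cap_by_topic_py : Prop := ∀ (articles : List (List (String × String))) (max_per_topic : Int), Dom_cap_by_topic_py articles max_per_topic → Spec_cap_by_topic_py articles max_per_topic (cap_by_topic_py articles max_per_topic)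

-- ===== LEMMAS AND PROOFS =====

-- number of articles of topic t in l
def cntT (t : String) (l : List (List (String × String))) : Nat :=
  l.countP (fun b => getTopic b == t)

-- common recursive description: process xs after an already-seen prefix pre
def capGo (m : Int) (pre : List (List (String × String))) :
    List (List (String × String)) → List (List (String × String))
  | [] => []
  | a :: rest =>
    if (cntT (getTopic a) pre : Int) < m then a :: capGo m (pre ++ [a]) rest
    else capGo m (pre ++ [a]) rest

lemma cntT_append_singleton (t : String) (l : List (List (String × String))) (a : List (String × String)) :
    cntT t (l ++ [a]) = cntT t l + (if getTopic a == t then 1 else 0) := by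
  simp [cntT, List.countP_append, List.countP_cons]

lemma alt_eq_capGo (m : Int) :
    ∀ (xs pre : List (List (String × String))),
      ((PySem.List.enumerate xs (pre.length : Int)).filter
        (fun ia =>
          ((PySem.List.slice (pre ++ xs) none (some ia.1)).countP
            (fun b => getTopic b == getTopic ia.2) : Int) < m)).map (·.2)
      = capGo m pre xs := by
  intro xs
  induction xs with
  | nil => intro pre; simp [capGo]
  | cons a rest ih =>
    intro pre
    have hslice : PySem.List.slice (pre ++ a :: rest) none (some (pre.length : Int))
        = pre := by
      rw [PySem.List.slice_to_natCast]
      simp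
    have hrest : pre ++ a :: rest = (pre ++ [a]) ++ rest := by simp
    have hlen : ((pre.length : Int) + 1) = ((pre ++ [a]).length : Int) := by
      simp
    rw [PySem.List.enumerate_cons, List.filter_cons]
    simp only [hslice]
    have ihx := ih (pre ++ [a])
    rw [hlen, hrest]
    by_cases h : ((pre.countP (fun b => getTopic b == getTopic a) : Int) < m)
    · simp only [h, decide_true, if_pos, List.map_cons, ihx]
      rw [capGo, if_pos (by simpa [cntT] using h)]
    · simp only [h, decide_false, if_neg, Bool.false_eq_true, not_false_eq_true, ihx]
      rw [capGo, if_neg (by simpa [cntT] using h)]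

lemma foldA_eq_capGo (m : Int) :
    ∀ (xs : List (List (String × String))) (counts : PySem.Dict String Int)
      (res pre : List (List (String × String))),
      (∀ t, counts.getD t 0 = min (cntT t pre : Int) (max m 0)) →
      (xs.foldl
        (fun (st : PySem.Dict String Int × List (List (String × String))) a =>
          let topic := getTopic a
          if st.1.getD topic 0 < m then
            (st.1.insert topic (st.1.getD topic 0 + 1), st.2 ++ [a])
          else st)
        (counts, res)).2
      = res ++ capGo m pre xs := by
  intro xs
  induction xs with
  | nil => intro counts res pre hinv; simp [capGo]
  | cons a rest ih =>
    intro counts res pre hinv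
    have htp := hinv (getTopic a)
    have hcond : (counts.getD (getTopic a) 0 < m) ↔ ((cntT (getTopic a) pre : Int) < m) := by
      rw [htp]; omega
    rw [List.foldl_cons]
    simp only []
    by_cases h : (cntT (getTopic a) pre : Int) < m
    · rw [if_pos (hcond.mpr h)]
      have hinv' : ∀ t, (counts.insert (getTopic a) (counts.getD (getTopic a) 0 + 1)).getD t 0
          = min (cntT t (pre ++ [a]) : Int) (max m 0) := by
        intro t
        rw [PySem.Dict.getD_insert, cntT_append_singleton]
        by_cases ht : t = getTopic a
        · subst ht
          simp only [beq_self_eq_true, htp]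
          push_cast
          omega
        · have hne : (getTopic a == t) = false := by
            simp; exact fun e => ht e.symm
          simp only [if_neg ht, hne, Bool.false_eq_true, if_false, Nat.add_zero]
          exact hinv t
      rw [ih _ (res ++ [a]) (pre ++ [a]) hinv']
      rw [capGo, if_pos h]
      simp
    · rw [if_neg (fun hc => h (hcond.mp hc))]
      have hinv' : ∀ t, counts.getD t 0 = min (cntT t (pre ++ [a]) : Int) (max m 0) := by
        intro t
        rw [cntT_append_singleton, hinv t]
        by_cases ht : (getTopic a == t) = true
        · have he : cntT t pre = cntT (getTopic a) pre := by
            simp only [beq_iff_eq] at ht; rw [ht]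
          rw [he]
          simp only [ht, if_pos]
          push_cast
          omega
        · simp only [ht, Bool.false_eq_true, if_false, Nat.add_zero]
      rw [ih _ res (pre ++ [a]) hinv']
      rw [capGo, if_neg h]

-- ===== VERDICT (by name: the statement is the Claim_ definition above) =====
theorem cap_by_topic_py_spec : Claim_equal_cap_by_topic_py := by
  intro articles m _
  unfold Spec_cap_by_topic_py cap_by_topic_py cap_by_topic_py_alt
  have hA := foldA_eq_capGo m articles PySem.Dict.empty [] []
    (by intro t; simp [PySem.Dict.getD_empty, cntT])
  have hB := alt_eq_capGo m articles []
  simp only [List.length_nil, Int.natCast_zero, List.nil_append] at hA hB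
  rw [hA]
  exact hB.symm
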